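-- pv_equiv track=rewrite | github.com/nashspence/riverhog | api/app/planner.py | leaves
-- ===== SOURCE A (Python) =====
-- def leaves(node, kids):
--     stack = [node]
--     while stack:
--         n = stack.pop()
--         if n not in kids:
--             yield n
--         else:
--             stack.extend(reversed(kids[n]))
-- ===== SOURCE B (Python) =====
-- def leaves(node, kids):
--     if node not in kids:
--         yield node
--     else:
--         for k in kids[node]:
--             yield from leaves(k, kids)
-- ===== Notes on version B (the rewrite author's own statement) =====
-- stated objective: simpler
-- what changed: Replaced the explicit stack loop with reversed() child pushes by a direct recursive generator that yields the node if it is a leaf and otherwise recurses over the children in forward order.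
import Mathlib
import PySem

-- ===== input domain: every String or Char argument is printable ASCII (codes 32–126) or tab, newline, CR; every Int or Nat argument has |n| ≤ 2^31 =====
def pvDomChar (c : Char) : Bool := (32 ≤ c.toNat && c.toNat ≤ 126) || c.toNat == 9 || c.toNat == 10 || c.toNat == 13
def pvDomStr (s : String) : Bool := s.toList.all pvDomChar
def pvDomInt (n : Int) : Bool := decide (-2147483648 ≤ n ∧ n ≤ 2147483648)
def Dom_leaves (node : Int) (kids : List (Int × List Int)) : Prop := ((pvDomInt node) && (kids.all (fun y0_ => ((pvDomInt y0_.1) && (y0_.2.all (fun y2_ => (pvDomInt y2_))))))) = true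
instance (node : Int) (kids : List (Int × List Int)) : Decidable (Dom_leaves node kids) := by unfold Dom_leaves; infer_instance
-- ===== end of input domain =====

-- B replaces A's explicit stack loop (with reversed child pushes) by a direct recursive
-- traversal of the children in forward order; same leaf sequence, simpler decomposition.
-- Both Pythons are generators; equivalence is about the full list of yielded values.

-- shared dict-lookup helper: 'n in kids' / 'kids[n]' (first match, per the assoc-list convention)
def findKids (kids : List (Int × List Int)) (n : Int) : Option (List Int) :=
  match kids with
  | [] => none
  | (k, v) :: rest => if k = n then some v else findKids rest n

-- ===== PORT A =====
-- A's while-loop over the stack; the stack's TOP is the list HEAD here, so Python's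
-- 'stack.extend(reversed(kids[n]))' followed by pops-from-the-end is 'cs ++ rest'.
-- fuel only makes the loop total (A diverges on cyclic inputs, excluded by Pre_).
def loopA (kids : List (Int × List Int)) : Nat → List Int → List Int
  | 0, _ => []
  | _ + 1, [] => []
  | f + 1, n :: rest =>
    match findKids kids n with
    | none => n :: loopA kids f rest
    | some cs => loopA kids f (cs ++ rest)

-- enough fuel for loopA when the recursion depth is bounded by d (cost of unfolding the tree)
def costA (kids : List (Int × List Int)) : Nat → Int → Nat
  | 0, _ => 1
  | d + 1, n =>
    match findKids kids n with
    | none => 1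
    | some cs => 1 + (cs.map (costA kids d)).sum

def leaves (node : Int) (kids : List (Int × List Int)) : List Int :=
  loopA kids (costA kids (kids.length + 1) node) [node]

-- ===== PORT B =====
-- recursive generator: leaf ⇒ yield it, else recurse over children in order;
-- fuel only makes it total (B's recursion diverges on cyclic inputs, excluded by Pre_).
def recB (kids : List (Int × List Int)) : Nat → Int → List Int
  | d, n =>
    match findKids kids n with
    | none => [n]
    | some cs =>
      match d with
      | 0 => []  -- fuel guard only; unreachable under Pre_
      | d' + 1 => cs.flatMap (recB kids d')

def leaves_alt (node : Int) (kids : List (Int × List Int)) : List Int :=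
  recB kids (kids.length + 1) node

-- ===== PRECONDITION & SPEC =====
-- Pre_ excludes exactly the inputs on which Python A never returns (the generator loops
-- forever because a cycle among the keys is reachable from node): it requires the
-- recursion depth from node to be bounded by kids.length + 1, which holds for every
-- acyclic reachable graph since a path repeats no key.
def okDepth (kids : List (Int × List Int)) : Nat → Int → Bool
  | 0, n => (findKids kids n).isNone
  | d + 1, n =>
    match findKids kids n with
    | none => true
    | some cs => cs.all (okDepth kids d)

def Pre_leaves (node : Int) (kids : List (Int × List Int)) : Prop :=
  okDepth kids (kids.length + 1) node = true
instance (node : Int) (kids : List (Int × List Int)) : Decidable (Pre_leaves node kids) := by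
  unfold Pre_leaves; infer_instance

def pvWitness_leaves : Int × (List (Int × List Int)) := (1, [(1, [2, 3]), (3, [4, 2])])

def Spec_leaves (node : Int) (kids : List (Int × List Int)) (out : List Int) : Prop := out = leaves_alt node kids
instance (node : Int) (kids : List (Int × List Int)) (out : List Int) : Decidable (Spec_leaves node kids out) := by unfold Spec_leaves; infer_instance

-- ===== CLAIM (what is proved, stated in full; the proofs are below) =====
def Claim_equal_leaves : Prop := ∀ (node : Int) (kids : List (Int × List Int)), Dom_leaves node kids → Pre_leaves node kids → Spec_leaves node kids (leaves node kids)

-- ===== LEMMAS AND PROOFS =====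

-- extra fuel does not change loopA's behaviour while processing a depth-ok node:
-- processing n (and its whole subtree) consumes exactly costA fuel and emits recB's leaves.
theorem loopA_cost (kids : List (Int × List Int)) :
    ∀ (d : Nat) (n : Int), okDepth kids d n = true →
      ∀ (f : Nat) (rest : List Int),
        loopA kids (costA kids d n + f) (n :: rest) = recB kids d n ++ loopA kids f rest := by
  intro d
  induction d with
  | zero =>
    intro n h f rest
    simp only [okDepth, Option.isNone_iff_eq_none] at h
    simp [costA, loopA, recB, h, Nat.add_comm]

  | succ d ih =>
    intro n h f rest
    simp only [okDepth] at h
    cases hk : findKids kids n with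
    | none =>
      simp [costA, loopA, recB, hk, Nat.add_comm]
    | some cs =>
      rw [hk] at h
      simp only [List.all_eq_true] at h
      -- loopA (1 + Σ + f) (n :: rest) = loopA (Σ + f) (cs ++ rest)
      have step : costA kids (d + 1) n + f = ((cs.map (costA kids d)).sum + f) + 1 := by
        simp [costA, hk]; omega
      rw [step]
      simp only [loopA, hk]
      -- inner induction over the children list
      have inner : ∀ (cs' : List Int), (∀ c ∈ cs', okDepth kids d c = true) →
          ∀ (f : Nat) (rest : List Int),
            loopA kids ((cs'.map (costA kids d)).sum + f) (cs' ++ rest)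
              = cs'.flatMap (recB kids d) ++ loopA kids f rest := by
        intro cs'
        induction cs' with
        | nil => intro _ f rest; simp
        | cons c cs'' ih2 =>
          intro hall f rest
          have hc : okDepth kids d c = true := hall c (by simp)
          have : (List.map (costA kids d) (c :: cs'')).sum + f
              = costA kids d c + ((cs''.map (costA kids d)).sum + f) := by
            simp [List.map_cons]; omega
          rw [List.cons_append, this, ih c hc, ih2 (fun x hx => hall x (by simp [hx]))]
          simp [List.flatMap_cons]
      rw [inner cs (fun c hc => h c hc) f rest]
      simp [recB, hk]

-- ===== VERDICT (by name: the statement is the Claim_ definition above) =====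
theorem leaves_spec : Claim_equal_leaves := by
  intro node kids _ hpre
  unfold Spec_leaves leaves leaves_alt
  have h := loopA_cost kids (kids.length + 1) node hpre 0 []
  simpa [loopA] using h
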